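-- pv_equiv track=rewrite | github.com/HikariTenshi/PyWuWaDPSCalc | wuwa_dps_calc.py | extract_number_after_x
-- ===== SOURCE A (Python) =====
-- def extract_number_after_x(input_string):
--     x_index = input_string.find('x')
--
--     if x_index == -1:
--         return None
--
--     number_start_index = x_index + 1
--
--     # Check if the character after 'x' is a digit
--     if number_start_index < len(input_string) and input_string[number_start_index].isdigit():
--         number_end_index = number_start_index
--
--         # Find the end of the digit sequence
--         while number_end_index < len(input_string) and input_string[number_end_index].isdigit():
--             number_end_index += 1
--
--         return int(input_string[number_start_index:number_end_index])
--
--     return None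
-- ===== SOURCE B (Python) =====
-- def extract_number_after_x(input_string):
--     _, sep, rest = input_string.partition('x')
--     if not sep:
--         return None
--     stripped = rest.lstrip('0123456789')
--     digits = rest[:len(rest) - len(stripped)]
--     return int(digits) if digits else None
-- ===== Notes on version B (the rewrite author's own statement) =====
-- stated objective: idiomatic
-- what changed: Replaces the manual find/index bookkeeping and the character-by-character while loop with str.partition to split at the first 'x' and an lstrip-based length computation to slice off the leading digit run.
import Mathlib
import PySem

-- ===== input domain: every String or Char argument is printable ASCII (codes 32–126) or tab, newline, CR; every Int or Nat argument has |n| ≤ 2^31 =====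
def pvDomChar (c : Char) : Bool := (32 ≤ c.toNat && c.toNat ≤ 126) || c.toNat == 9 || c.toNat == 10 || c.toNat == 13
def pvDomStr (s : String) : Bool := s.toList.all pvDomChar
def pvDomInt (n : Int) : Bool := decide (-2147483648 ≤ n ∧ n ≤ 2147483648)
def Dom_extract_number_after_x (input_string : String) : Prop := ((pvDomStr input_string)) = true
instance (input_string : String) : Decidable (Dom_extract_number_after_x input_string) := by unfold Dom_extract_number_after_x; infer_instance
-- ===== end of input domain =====

-- B replaces A's manual index scanning (find + char-by-char while loop) with
-- partition('x') and an lstrip-based slice of the digit run; same cost, more idiomatic.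

-- ===== PORT A =====
-- the 'while number_end_index < len(s) and s[number_end_index].isdigit(): number_end_index += 1'
-- loop (the 'and' short-circuits, hence the nested ifs)
def pvScanEnd (cs : List Char) (j : Nat) : Nat :=
  if h : j < cs.length then
    if PySem.Chars.isdigit cs[j] then pvScanEnd cs (j + 1) else j
  else j
termination_by cs.length - j
decreasing_by omega

def extract_number_after_x (input_string : String) : Option Int :=
  let cs := input_string.toList
  let xIndex : Int := PySem.Chars.find cs ['x']    -- input_string.find('x')
  if xIndex = -1 then none
  else
    let numberStart : Nat := xIndex.toNat + 1      -- x_index + 1 (find is ≥ 0 here)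
    -- 'if number_start_index < len(s) and s[number_start_index].isdigit():' (short-circuit 'and')
    if h : numberStart < cs.length then
      if PySem.Chars.isdigit cs[numberStart] then
        let numberEnd := pvScanEnd cs numberStart
        -- int(input_string[number_start_index:number_end_index])
        PySem.Int.ofChars? (PySem.List.slice cs (some (numberStart : Int)) (some (numberEnd : Int)))
      else none
    else none

-- ===== PORT B =====
-- s.partition('x') restricted to what B uses: the suffix after the first 'x' (none if no 'x')
def pvAfterX : List Char → Option (List Char)
  | [] => none
  | c :: r => if c = 'x' then some r else pvAfterX r

def pvDigitChars : List Char := ['0','1','2','3','4','5','6','7','8','9']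

def extract_number_after_x_alt (input_string : String) : Option Int :=
  match pvAfterX input_string.toList with
  | none => none
  | some rest =>
    -- rest.lstrip('0123456789') : drop leading characters belonging to the strip set
    let stripped := rest.dropWhile (fun c => c ∈ pvDigitChars)
    -- rest[:len(rest) - len(stripped)]
    let digits := rest.take (rest.length - stripped.length)
    if digits = [] then none else PySem.Int.ofChars? digits

-- ===== PRECONDITION & SPEC =====
def Spec_extract_number_after_x (input_string : String) (out : Option Int) : Prop := out = extract_number_after_x_alt input_string
instance (input_string : String) (out : Option Int) : Decidable (Spec_extract_number_after_x input_string out) := by unfold Spec_extract_number_after_x; infer_instance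

-- ===== CLAIM (what is proved, stated in full; the proofs are below) =====
def Claim_equal_extract_number_after_x : Prop := ∀ (input_string : String), Dom_extract_number_after_x input_string → Spec_extract_number_after_x input_string (extract_number_after_x input_string)

-- ===== LEMMAS AND PROOFS =====

theorem pvCharEqOfToNat (c d : Char) (h : c.toNat = d.toNat) : c = d := by
  apply Char.ext
  exact UInt32.toNat_inj.mp h

theorem pvDigit_mem_iff (c : Char) :
    (decide (c ∈ pvDigitChars)) = PySem.Chars.isdigit c := by
  have h : (c ∈ pvDigitChars) ↔ ('0' ≤ c ∧ c ≤ '9') := by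
    constructor
    · intro h
      simp only [pvDigitChars, List.mem_cons, List.not_mem_nil, or_false] at h
      rcases h with h|h|h|h|h|h|h|h|h|h <;> subst h <;> exact ⟨by decide, by decide⟩
    · rintro ⟨h1, h2⟩
      have l1 : 48 ≤ c.toNat := h1
      have l2 : c.toNat ≤ 57 := h2
      have hd : c.toNat = 48 ∨ c.toNat = 49 ∨ c.toNat = 50 ∨ c.toNat = 51 ∨ c.toNat = 52 ∨
          c.toNat = 53 ∨ c.toNat = 54 ∨ c.toNat = 55 ∨ c.toNat = 56 ∨ c.toNat = 57 := by omega
      simp only [pvDigitChars, List.mem_cons, List.not_mem_nil, or_false]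
      rcases hd with h|h|h|h|h|h|h|h|h|h
      · exact Or.inl (pvCharEqOfToNat c '0' h)
      · exact Or.inr (Or.inl (pvCharEqOfToNat c '1' h))
      · exact Or.inr (Or.inr (Or.inl (pvCharEqOfToNat c '2' h)))
      · exact Or.inr (Or.inr (Or.inr (Or.inl (pvCharEqOfToNat c '3' h))))
      · exact Or.inr (Or.inr (Or.inr (Or.inr (Or.inl (pvCharEqOfToNat c '4' h)))))
      · exact Or.inr (Or.inr (Or.inr (Or.inr (Or.inr (Or.inl (pvCharEqOfToNat c '5' h))))))
      · exact Or.inr (Or.inr (Or.inr (Or.inr (Or.inr (Or.inr (Or.inl (pvCharEqOfToNat c '6' h)))))))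
      · exact Or.inr (Or.inr (Or.inr (Or.inr (Or.inr (Or.inr (Or.inr (Or.inl (pvCharEqOfToNat c '7' h))))))))
      · exact Or.inr (Or.inr (Or.inr (Or.inr (Or.inr (Or.inr (Or.inr (Or.inr (Or.inl (pvCharEqOfToNat c '8' h)))))))))
      · exact Or.inr (Or.inr (Or.inr (Or.inr (Or.inr (Or.inr (Or.inr (Or.inr (Or.inr (pvCharEqOfToNat c '9' h)))))))))
  rw [PySem.Chars.isdigit, ← Bool.decide_and]
  exact decide_eq_decide.mpr h

theorem pvAfterX_of_not_mem (cs : List Char) (h : 'x' ∉ cs) : pvAfterX cs = none := by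
  induction cs with
  | nil => rfl
  | cons c r ih =>
    simp only [List.mem_cons, not_or] at h
    simp [pvAfterX, Ne.symm h.1, ih h.2]

theorem pvAfterX_append (pre t : List Char) (h : 'x' ∉ pre) :
    pvAfterX (pre ++ 'x' :: t) = some t := by
  induction pre with
  | nil => simp [pvAfterX]
  | cons c r ih =>
    simp only [List.mem_cons, not_or] at h
    simp [pvAfterX, Ne.symm h.1, ih h.2]

theorem pvScanEnd_eq (cs : List Char) (j : Nat) :
    pvScanEnd cs j = j + ((cs.drop j).takeWhile PySem.Chars.isdigit).length := by
  fun_induction pvScanEnd cs j with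
  | case1 j hj hd ih =>
    have hdrop : cs.drop j = cs[j] :: cs.drop (j + 1) := List.drop_eq_getElem_cons hj
    rw [ih, hdrop, List.takeWhile_cons_of_pos hd]
    simp only [List.length_cons]
    omega
  | case2 j hj hd =>
    have hdrop : cs.drop j = cs[j] :: cs.drop (j + 1) := List.drop_eq_getElem_cons hj
    rw [hdrop, List.takeWhile_cons_of_neg (by simpa using hd)]
    simp
  | case3 j hj =>
    rw [List.drop_eq_nil_of_le (by omega)]
    simp

-- B's digit slice 'rest[:len(rest)-len(rest.lstrip(digits))]' is the leading digit run
theorem pvDigitsEq (rest : List Char) :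
    rest.take (rest.length - (rest.dropWhile (fun c => decide (c ∈ pvDigitChars))).length)
      = rest.takeWhile PySem.Chars.isdigit := by
  have hp : (fun c => decide (c ∈ pvDigitChars)) = PySem.Chars.isdigit := funext pvDigit_mem_iff
  rw [hp]
  have hlen : rest.length
      = (rest.takeWhile PySem.Chars.isdigit).length + (rest.dropWhile PySem.Chars.isdigit).length := by
    have h2 := congrArg List.length (List.takeWhile_append_dropWhile (p := PySem.Chars.isdigit) (l := rest))
    simp only [List.length_append] at h2
    omega
  rw [hlen, Nat.add_sub_cancel]
  exact (List.prefix_iff_eq_take.mp (List.takeWhile_prefix _)).symm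

theorem extract_number_after_x_spec : Claim_equal_extract_number_after_x := by
  intro s _
  unfold Spec_extract_number_after_x extract_number_after_x extract_number_after_x_alt
  set cs := s.toList with hcs
  by_cases hx : ['x'] <:+: cs
  case neg =>
    have hfind : PySem.Chars.find cs ['x'] = -1 := (PySem.Chars.find_eq_neg_one_iff _ _).mpr hx
    have hmem : 'x' ∉ cs := fun hm => hx ((List.singleton_infix_iff 'x' cs).mpr hm)
    rw [pvAfterX_of_not_mem cs hmem]
    simp [hfind]
  case pos =>
    have hfind0 : 0 ≤ PySem.Chars.find cs ['x'] := (PySem.Chars.find_nonneg_iff _ _).mpr hx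
    obtain ⟨hpre, hmin⟩ := PySem.Chars.find_spec (s := cs) (sub := ['x']) hfind0
    set i := (PySem.Chars.find cs ['x']).toNat with hi
    have hne : PySem.Chars.find cs ['x'] ≠ -1 := by omega
    obtain ⟨t, ht⟩ := hpre
    have hti : t = cs.drop (i + 1) := by
      have h1 : (cs.drop i).tail = cs.drop (i + 1) := by
        rw [List.tail_drop]
      rw [← h1, ← ht]
      rfl
    have hdropi : cs.drop i = 'x' :: cs.drop (i + 1) := by rw [← ht, hti]; rfl
    have hlen_i : i < cs.length := by
      by_contra hc
      have : cs.drop i = [] := List.drop_eq_nil_of_le (by omega)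
      rw [this] at hdropi
      simp at hdropi
    have hsplit : cs = cs.take i ++ 'x' :: cs.drop (i + 1) := by
      conv_lhs => rw [← List.take_append_drop i cs]
      rw [hdropi]
    have hnotpre : 'x' ∉ cs.take i := by
      intro hm
      obtain ⟨k, hk, hkeq⟩ := List.getElem_of_mem hm
      have hki : k < i := by
        have := hk
        simp only [List.length_take] at this
        omega
      have hgk : cs[k]'(by omega) = 'x' := by
        rw [List.getElem_take] at hkeq
        exact hkeq
      apply hmin k hki
      refine ⟨cs.drop (k + 1), ?_⟩
      have h3 := List.drop_eq_getElem_cons (l := cs) (i := k) (by omega)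
      rw [hgk] at h3
      exact h3.symm
    have hB : pvAfterX cs = some (cs.drop (i + 1)) := by
      conv_lhs => rw [hsplit]
      exact pvAfterX_append _ _ hnotpre
    rw [hB]
    simp only [if_neg hne]
    rcases hrest : cs.drop (i + 1) with _ | ⟨c, t2⟩
    · -- no character after 'x'
      have hge : cs.length ≤ i + 1 := List.drop_eq_nil_iff.mp hrest
      rw [dif_neg (by omega)]
      simp
    · have hlt : i + 1 < cs.length := by
        by_contra hc
        rw [List.drop_eq_nil_of_le (by omega)] at hrest
        simp at hrest
      have hget : cs[i + 1]'hlt = c := by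
        have := List.drop_eq_getElem_cons hlt
        rw [hrest] at this
        exact (List.cons.injEq _ _ _ _ ▸ this).1.symm
      rw [dif_pos hlt]
      by_cases hd : PySem.Chars.isdigit c
      · -- digit run follows
        have htw : (cs.drop (i + 1)).takeWhile PySem.Chars.isdigit
            = c :: t2.takeWhile PySem.Chars.isdigit := by
          rw [hrest, List.takeWhile_cons_of_pos hd]
        have hnonempty : (cs.drop (i + 1)).takeWhile PySem.Chars.isdigit ≠ [] := by
          rw [htw]; exact List.cons_ne_nil _ _
        rw [if_pos (hget ▸ hd), pvScanEnd_eq]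
        have hslice : PySem.List.slice cs (some ((i + 1 : Nat) : Int))
            (some (((i + 1) + ((cs.drop (i + 1)).takeWhile PySem.Chars.isdigit).length : Nat) : Int))
            = (cs.drop (i + 1)).takeWhile PySem.Chars.isdigit := by
          have hcast : (((i + 1) + ((cs.drop (i + 1)).takeWhile PySem.Chars.isdigit).length : Nat) : Int)
              = ((i + 1 : Nat) : Int) + (((cs.drop (i + 1)).takeWhile PySem.Chars.isdigit).length : Int) := by
            push_cast; ring
          rw [hcast, PySem.List.slice_natCast_add]
          exact (List.prefix_iff_eq_take.mp (List.takeWhile_prefix _)).symm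
        rw [hslice, pvDigitsEq, hrest]
        rw [hrest] at hnonempty htw
        rw [htw] at hnonempty ⊢
        rw [if_neg hnonempty]
      · -- character after 'x' is not a digit: both None
        rw [if_neg (hget ▸ hd), pvDigitsEq]
        rw [List.takeWhile_cons_of_neg (by simpa using hd)]
        simp
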